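-- pv_equiv track=rewrite | github.com/keithwegner/knives-out | scripts/sync_wiki.py | extract_intro
-- ===== SOURCE A (Python) =====
-- def extract_intro(markdown: str) -> str:
--     lines = markdown.splitlines()
--     intro_lines: list[str] = []
--     for line in lines[1:]:
--         if line.startswith("## "):
--             break
--         if line.startswith("[!["):
--             continue
--         intro_lines.append(line)
--     return "\n".join(intro_lines).strip() + "\n"
-- ===== SOURCE B (Python) =====
-- def extract_intro(markdown: str) -> str:
--     # Backward pass: walk the lines after the first in reverse; on seeing a
--     # '## ' heading, discard everything collected so far (it lies after the
--     # first heading), otherwise keep non-badge lines; reverse once at the end.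
--     acc = []
--     for line in reversed(markdown.splitlines()[1:]):
--         if line.startswith("## "):
--             acc = []
--         elif not line.startswith("[!["):
--             acc.append(line)
--     acc.reverse()
--     return "\n".join(acc).strip() + "\n"
-- ===== Notes on version B (the rewrite author's own statement) =====
-- stated objective: alternative
-- what changed: Replaces A's forward break/continue loop by a reverse traversal with a reset-on-heading accumulator (every heading seen clears what was collected after it), reversed once at the end.
import Mathlib
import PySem

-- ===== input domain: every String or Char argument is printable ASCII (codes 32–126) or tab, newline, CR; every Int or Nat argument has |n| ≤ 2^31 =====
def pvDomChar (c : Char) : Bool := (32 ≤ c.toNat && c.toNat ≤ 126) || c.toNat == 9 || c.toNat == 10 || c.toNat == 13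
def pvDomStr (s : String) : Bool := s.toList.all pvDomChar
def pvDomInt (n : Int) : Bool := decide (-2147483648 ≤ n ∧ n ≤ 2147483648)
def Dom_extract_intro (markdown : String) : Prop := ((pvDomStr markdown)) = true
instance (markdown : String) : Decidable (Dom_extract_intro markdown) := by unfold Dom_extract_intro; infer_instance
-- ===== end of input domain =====

-- B replaces A's forward break/continue loop with a reverse traversal whose accumulator is
-- reset at every heading, reversed once at the end (alternative decomposition, same cost).

-- ===== PORT A =====
-- A's for-loop with break/continue, as structural recursion over lines[1:]
def extractIntroLoop : List String → List String
  | [] => []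
  | l :: rest =>
    if PySem.Str.startswith l "## " then []
    else if PySem.Str.startswith l "[![" then extractIntroLoop rest
    else l :: extractIntroLoop rest

def extract_intro (markdown : String) : String :=
  let lines := PySem.List.slice (PySem.Str.splitlines markdown) (some 1) none
  PySem.Str.strip (PySem.Str.join "\n" (extractIntroLoop lines)) ++ "\n"

-- ===== PORT B =====
-- one step of B's reverse loop body
def extractIntroStep (acc : List String) (l : String) : List String :=
  if PySem.Str.startswith l "## " then []
  else if !PySem.Str.startswith l "[![" then acc ++ [l]
  else acc

def extract_intro_alt (markdown : String) : String :=
  let lines := PySem.List.slice (PySem.Str.splitlines markdown) (some 1) none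
  let acc := lines.reverse.foldl extractIntroStep []
  PySem.Str.strip (PySem.Str.join "\n" acc.reverse) ++ "\n"

-- ===== PRECONDITION & SPEC =====
def Spec_extract_intro (markdown : String) (out : String) : Prop := out = extract_intro_alt markdown
instance (markdown : String) (out : String) : Decidable (Spec_extract_intro markdown out) := by unfold Spec_extract_intro; infer_instance

-- ===== CLAIM =====
def Claim_equal_extract_intro : Prop := ∀ (markdown : String), Dom_extract_intro markdown → Spec_extract_intro markdown (extract_intro markdown)

-- ===== LEMMAS AND PROOFS =====
-- B's reverse fold, read as a foldr over the original order, reversed, equals A's loop.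
theorem foldl_reverse_eq_loop (ls : List String) :
    (ls.reverse.foldl extractIntroStep []).reverse = extractIntroLoop ls := by
  rw [List.foldl_reverse]
  induction ls with
  | nil => rfl
  | cons l rest ih =>
    rw [List.foldr_cons]
    generalize List.foldr (fun x y => extractIntroStep y x) [] rest = r at ih
    simp only [extractIntroLoop, extractIntroStep, PySem.Str.startswith]
    by_cases h : PySem.Chars.startswith l.toList ['#', '#', ' '] = true <;>
      by_cases h2 : PySem.Chars.startswith l.toList ['[', '!', '['] = true <;>
      simp [h, h2, ih]

-- ===== VERDICT =====
theorem extract_intro_spec : Claim_equal_extract_intro := by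
  intro markdown _
  unfold Spec_extract_intro extract_intro extract_intro_alt
  simp only [foldl_reverse_eq_loop]
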